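-- pv_equiv track=rewrite | github.com/spenchamb/Distributed-Systems-Projs | assignment3/wordcount.py | __wcgroupmaps
-- ===== SOURCE A (Python) =====
-- def __wcgroupmaps(maps, num_reducers):
--   start = 97
--   abc_ranges = []
--   rangesize = 26 // num_reducers
--   leftover = 26 % num_reducers
--   for i in range(num_reducers):
--     abc_ranges.append(list(range(start, start + rangesize)))
--     start += rangesize
--   abc_ranges[-1] += list(range(start, start + leftover))
--   for i in range(len(abc_ranges)):
--     for j in range(len(abc_ranges[i])):
--       abc_ranges[i][j] = chr(abc_ranges[i][j])
--   res = []
--   for i in range(num_reducers): res.append([])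
--   for mp in maps:
--     for i in range(num_reducers):
--       if mp[0][0] in abc_ranges[i]: res[i].append(mp)
--   return res
-- ===== SOURCE B (Python) =====
-- def __wcgroupmaps(maps, num_reducers):
--   rangesize = 26 // num_reducers
--   res = [[] for _ in range(num_reducers)]
--   for mp in maps:
--     c = mp[0][0]
--     if 'a' <= c <= 'z':
--       if rangesize == 0:
--         idx = num_reducers - 1
--       else:
--         idx = min((ord(c) - 97) // rangesize, num_reducers - 1)
--       res[idx].append(mp)
--   return res
-- ===== Notes on version B (the rewrite author's own statement) =====
-- stated objective: faster
-- what changed: Replaces the construction of per-reducer letter-range lists and the per-map scan over all buckets with a direct arithmetic bucket index min((ord(c)-97)//rangesize, num_reducers-1) (last bucket when rangesize==0), appending each map straight to its bucket.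
import Mathlib
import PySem

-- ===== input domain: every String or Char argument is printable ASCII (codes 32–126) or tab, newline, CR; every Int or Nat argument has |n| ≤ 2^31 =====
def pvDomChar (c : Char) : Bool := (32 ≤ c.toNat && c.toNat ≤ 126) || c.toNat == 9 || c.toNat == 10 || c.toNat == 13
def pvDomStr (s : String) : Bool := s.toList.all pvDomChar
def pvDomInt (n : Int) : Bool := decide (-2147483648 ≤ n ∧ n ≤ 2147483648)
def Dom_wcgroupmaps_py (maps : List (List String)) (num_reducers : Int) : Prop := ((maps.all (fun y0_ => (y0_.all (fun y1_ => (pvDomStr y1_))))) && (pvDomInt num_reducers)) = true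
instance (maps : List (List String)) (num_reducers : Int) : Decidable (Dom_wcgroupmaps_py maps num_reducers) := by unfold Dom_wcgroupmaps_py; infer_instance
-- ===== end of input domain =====

-- B replaces A's per-reducer letter-range lists and per-map scan over all buckets by a direct
-- arithmetic bucket index (simpler; same return value).

-- ===== PORT A =====
def wcgroupmaps_py (maps : List (List String)) (num_reducers : Int) : List (List (List String)) :=
  -- start = 97; abc_ranges = []; rangesize = 26 // num_reducers; leftover = 26 % num_reducers
  let rangesize : Int := PySem.Int.floordiv 26 num_reducers
  let leftover : Int := PySem.Int.mod 26 num_reducers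
  -- for i in range(num_reducers): abc_ranges.append(list(range(start, start+rangesize))); start += rangesize
  let built := (PySem.List.pyRange 0 num_reducers 1).foldl
    (fun (st : Int × List (List Int)) _ =>
      (st.1 + rangesize, st.2 ++ [PySem.List.pyRange st.1 (st.1 + rangesize) 1]))
    (97, ([] : List (List Int)))
  -- abc_ranges[-1] += list(range(start, start + leftover))
  let abc_ranges := built.2.dropLast ++
    [PySem.List.pyGetD built.2 (-1) [] ++ PySem.List.pyRange built.1 (built.1 + leftover) 1]
  -- for i …: for j …: abc_ranges[i][j] = chr(abc_ranges[i][j])   (chr exact on 97..122 used here)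
  let abc : List (List Char) := abc_ranges.map (fun r => r.map (fun k => Char.ofNat k.toNat))
  -- res = []; for i in range(num_reducers): res.append([])
  let res0 := (PySem.List.pyRange 0 num_reducers 1).foldl
    (fun (r : List (List (List String))) _ => r ++ [[]]) []
  -- for mp in maps: for i in range(num_reducers): if mp[0][0] in abc_ranges[i]: res[i].append(mp)
  maps.foldl (fun res mp =>
    (PySem.List.pyRange 0 num_reducers 1).foldl (fun res i =>
      if ((PySem.Str.pyGet? (PySem.List.pyGetD mp 0 "") 0).getD ' ') ∈ PySem.List.pyGetD abc i [] then
        PySem.List.pySetD res i (PySem.List.pyGetD res i [] ++ [mp])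
      else res) res) res0

-- ===== PORT B =====
def wcgroupmaps_py_alt (maps : List (List String)) (num_reducers : Int) : List (List (List String)) :=
  let rangesize : Int := PySem.Int.floordiv 26 num_reducers
  maps.foldl (fun res mp =>
    let c := (PySem.Str.pyGet? (PySem.List.pyGetD mp 0 "") 0).getD ' '
    if 'a' ≤ c ∧ c ≤ 'z' then
      let idx : Int := if rangesize = 0 then num_reducers - 1
        else min (PySem.Int.floordiv ((c.toNat : Int) - 97) rangesize) (num_reducers - 1)
      PySem.List.pySetD res idx (PySem.List.pyGetD res idx [] ++ [mp])
    else res)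
    ((PySem.List.pyRange 0 num_reducers 1).map (fun _ => []))

-- ===== PRECONDITION & SPEC =====
-- A raises on num_reducers ≤ 0 (ZeroDivisionError for 0, IndexError on abc_ranges[-1] for < 0)
-- and on any map that is empty or whose first word is empty (IndexError on mp[0][0]).
def Pre_wcgroupmaps_py (maps : List (List String)) (num_reducers : Int) : Prop :=
  0 < num_reducers ∧ ∀ mp ∈ maps, mp ≠ [] ∧ mp.headD "" ≠ ""
instance (maps : List (List String)) (num_reducers : Int) : Decidable (Pre_wcgroupmaps_py maps num_reducers) := by unfold Pre_wcgroupmaps_py; infer_instance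

def pvWitness_wcgroupmaps_py : List (List String) × Int := ([["apple", "1"], ["Zebra"], ["milk", "2"]], 3)

def Spec_wcgroupmaps_py (maps : List (List String)) (num_reducers : Int) (out : List (List (List String))) : Prop := out = wcgroupmaps_py_alt maps num_reducers
instance (maps : List (List String)) (num_reducers : Int) (out : List (List (List String))) : Decidable (Spec_wcgroupmaps_py maps num_reducers out) := by unfold Spec_wcgroupmaps_py; infer_instance

-- ===== CLAIM (what is proved, stated in full; the proofs are below) =====
def Claim_equal_wcgroupmaps_py : Prop := ∀ (maps : List (List String)) (num_reducers : Int), Dom_wcgroupmaps_py maps num_reducers → Pre_wcgroupmaps_py maps num_reducers → Spec_wcgroupmaps_py maps num_reducers (wcgroupmaps_py maps num_reducers)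


-- ===== LEMMAS AND PROOFS =====

-- bucket i of A's table, before chr
def pvBucketRaw (rs i : Int) : List Int := PySem.List.pyRange (97 + i * rs) (97 + i * rs + rs) 1

-- B's bucket index, as a function
def pvIdx (n rs : Int) (c : Char) : Int :=
  if rs = 0 then n - 1 else min (PySem.Int.floordiv ((c.toNat : Int) - 97) rs) (n - 1)

-- A's abc table in closed form
def pvAbc (n rs lo : Int) : List (List Char) :=
  (PySem.List.pyRange 0 (n - 1) 1).map (fun i => (pvBucketRaw rs i).map (fun k => Char.ofNat k.toNat)) ++
  [(pvBucketRaw rs (n - 1) ++ PySem.List.pyRange (97 + n * rs) (97 + n * rs + lo) 1).map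
      (fun k => Char.ofNat k.toNat)]

theorem pvCharOfNatToNat (m : Nat) (h : m < 55296) : (Char.ofNat m).toNat = m := by
  unfold Char.ofNat
  split
  · rfl
  · rename_i hv; exact absurd (Or.inl (by omega)) hv

theorem pvMemChrRange (a b : Int) (ha : 97 ≤ a) (hb : b ≤ 123) (c : Char) :
    (c ∈ (PySem.List.pyRange a b 1).map (fun k => Char.ofNat k.toNat)) ↔
      (a ≤ (c.toNat : Int) ∧ (c.toNat : Int) < b) := by
  constructor
  · intro h
    obtain ⟨k, hk, hck⟩ := List.mem_map.mp h
    obtain ⟨hk1, hk2⟩ := PySem.List.mem_pyRange_one.mp hk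
    have hval : (Char.ofNat k.toNat).toNat = k.toNat := pvCharOfNatToNat k.toNat (by omega)
    rw [← hck]
    omega
  · intro h
    refine List.mem_map.mpr ⟨(c.toNat : Int), PySem.List.mem_pyRange_one.mpr ⟨h.1, h.2⟩, ?_⟩
    simp [Char.ofNat_toNat]

theorem pvBuildEq (rs : Int) : ∀ (n : Int), 0 ≤ n →
    (PySem.List.pyRange 0 n 1).foldl
      (fun (st : Int × List (List Int)) _ =>
        (st.1 + rs, st.2 ++ [PySem.List.pyRange st.1 (st.1 + rs) 1]))
      (97, ([] : List (List Int)))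
    = (97 + n * rs, (PySem.List.pyRange 0 n 1).map (fun i => pvBucketRaw rs i)) := by
  intro n hn
  induction n, hn using Int.le_induction with
  | base => simp [PySem.List.pyRange_one_eq_nil (le_refl 0)]
  | succ n hn ih =>
    rw [PySem.List.pyRange_one_succ_right (by omega : (0:Int) ≤ n), List.foldl_append, ih,
      List.map_append]
    simp only [List.foldl_cons, List.foldl_nil, List.map_cons, List.map_nil, Prod.mk.injEq]
    exact ⟨by ring, by unfold pvBucketRaw; rfl⟩

theorem pvAbcEq (n rs lo : Int) (hn : 0 < n) :
    ((((PySem.List.pyRange 0 n 1).map (fun i => pvBucketRaw rs i)).dropLast ++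
      [PySem.List.pyGetD ((PySem.List.pyRange 0 n 1).map (fun i => pvBucketRaw rs i)) (-1) [] ++
        PySem.List.pyRange (97 + n * rs) (97 + n * rs + lo) 1]).map
      (fun r => r.map (fun k => Char.ofNat k.toNat)))
    = pvAbc n rs lo := by
  have h2 : PySem.List.pyRange (n - 1) n 1 = [n - 1] := by
    have h := PySem.List.pyRange_one_singleton (n - 1)
    rwa [show n - 1 + 1 = n by omega] at h
  have hsplit : PySem.List.pyRange 0 n 1 =
      PySem.List.pyRange 0 (n - 1) 1 ++ [n - 1] := by
    rw [PySem.List.pyRange_one_append 0 (n - 1) n (by omega) (by omega), h2]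
  rw [hsplit, List.map_append]
  simp [PySem.List.pyGetD_neg_one_append_singleton, pvAbc, List.map_append, List.map_map,
    Function.comp]

theorem pvAbcGetLt (n rs lo i : Int) (h0 : 0 ≤ i) (h1 : i < n - 1) :
    PySem.List.pyGetD (pvAbc n rs lo) i [] =
      (pvBucketRaw rs i).map (fun k => Char.ofNat k.toNat) := by
  unfold pvAbc
  have hlen : ((PySem.List.pyRange 0 (n - 1) 1).map
      (fun i => (pvBucketRaw rs i).map (fun k => Char.ofNat k.toNat))).length = (n - 1).toNat := by
    simp [PySem.List.length_pyRange_one]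
  rw [PySem.List.pyGetD_eq_getElem _ _ h0 (by simp [hlen]; try omega)]
  rw [List.getElem_append_left (by rw [hlen]; omega)]
  have h := PySem.List.pyGetD_map_pyRange_of_nonneg
    (fun i => (pvBucketRaw rs i).map (fun k => Char.ofNat k.toNat)) (n - 1) i [] h0 h1
  rwa [PySem.List.pyGetD_eq_getElem _ _ h0 (by simp [PySem.List.length_pyRange_one]; try omega)] at h

theorem pvAbcGetLast (n rs lo : Int) (hn : 0 < n) :
    PySem.List.pyGetD (pvAbc n rs lo) (n - 1) [] =
      (pvBucketRaw rs (n - 1) ++ PySem.List.pyRange (97 + n * rs) (97 + n * rs + lo) 1).map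
        (fun k => Char.ofNat k.toNat) := by
  unfold pvAbc
  have hlen : ((PySem.List.pyRange 0 (n - 1) 1).map
      (fun i => (pvBucketRaw rs i).map (fun k => Char.ofNat k.toNat))).length = (n - 1).toNat := by
    simp [PySem.List.length_pyRange_one]
  have hfull : (n - 1) < (((PySem.List.pyRange 0 (n - 1) 1).map
      (fun i => (pvBucketRaw rs i).map (fun k => Char.ofNat k.toNat))) ++
      [(pvBucketRaw rs (n - 1) ++ PySem.List.pyRange (97 + n * rs) (97 + n * rs + lo) 1).map
        (fun k => Char.ofNat k.toNat)]).length := by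
    rw [List.length_append, hlen]; simp; omega
  rw [PySem.List.pyGetD_eq_getElem _ _ (by omega) hfull]
  rw [List.getElem_append_right (by rw [hlen])]
  simp [hlen]

theorem pvMemAbcIff (n i : Int) (hn : 0 < n) (h0 : 0 ≤ i) (h1 : i < n) (c : Char) :
    (c ∈ PySem.List.pyGetD (pvAbc n (PySem.Int.floordiv 26 n) (PySem.Int.mod 26 n)) i []) ↔
      (('a' ≤ c ∧ c ≤ 'z') ∧ pvIdx n (PySem.Int.floordiv 26 n) c = i) := by
  set rs := PySem.Int.floordiv 26 n with hrs
  set lo := PySem.Int.mod 26 n with hlo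
  have hrs0 : 0 ≤ rs := (PySem.Int.le_floordiv_iff_mul_le hn).mpr (by omega)
  have h26 : rs * n + lo = 26 := PySem.Int.floordiv_mul_add_mod 26 n
  have hlo0 : 0 ≤ lo := PySem.Int.mod_nonneg 26 hn
  have hletter : ('a' ≤ c ∧ c ≤ 'z') ↔ (97 ≤ (c.toNat : Int) ∧ (c.toNat : Int) ≤ 122) := by
    have e1 : ('a' ≤ c) ↔ 97 ≤ c.toNat := Iff.rfl
    have e2 : (c ≤ 'z') ↔ c.toNat ≤ 122 := Iff.rfl
    rw [e1, e2]; omega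
  by_cases hi : i < n - 1
  · rw [pvAbcGetLt n rs lo i h0 hi]
    unfold pvBucketRaw
    rcases eq_or_lt_of_le hrs0 with hz | hpos
    · rw [← hz]
      rw [show 97 + i * 0 + 0 = 97 + i * 0 by ring, PySem.List.pyRange_one_eq_nil (le_refl _)]
      simp only [List.map_nil, List.not_mem_nil, false_iff, not_and]
      intro _
      unfold pvIdx
      rw [if_pos rfl]
      omega
    · have hmul1 : 0 ≤ i * rs := mul_nonneg h0 hrs0
      have hmul2 : (i + 1) * rs ≤ n * rs := mul_le_mul_of_nonneg_right (by omega) hrs0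
      have hring : (i + 1) * rs = i * rs + rs := by ring
      have hnrs : n * rs = rs * n := mul_comm n rs
      rw [pvMemChrRange _ _ (by omega) (by omega), hletter]
      unfold pvIdx
      rw [if_neg (by omega : ¬ rs = 0)]
      have hq := (PySem.Int.floordiv_eq_iff_of_pos hpos
        (a := (c.toNat : Int) - 97) (q := PySem.Int.floordiv ((c.toNat : Int) - 97) rs)).mp rfl
      set q := PySem.Int.floordiv ((c.toNat : Int) - 97) rs with hqdef
      constructor
      · intro hmem
        have hqi : q = i := by
          rw [hqdef]
          exact (PySem.Int.floordiv_eq_iff_of_pos hpos).mpr ⟨by omega, by omega⟩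
        refine ⟨⟨by omega, by omega⟩, by omega⟩
      · intro hresult
        have hqi : q = i := by omega
        rw [hqi] at hq
        omega
  · have hieq : i = n - 1 := by omega
    subst hieq
    rw [pvAbcGetLast n rs lo hn, List.map_append, List.mem_append]
    unfold pvBucketRaw
    have hmul1 : 0 ≤ (n - 1) * rs := mul_nonneg (by omega) hrs0
    have hring : (n - 1) * rs + rs = n * rs := by ring
    have hnrs : n * rs = rs * n := mul_comm n rs
    rw [pvMemChrRange _ _ (by omega) (by omega), pvMemChrRange _ _ (by omega) (by omega), hletter]
    unfold pvIdx
    rcases eq_or_lt_of_le hrs0 with hz | hpos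
    · rw [if_pos hz.symm]
      have e1 : (n - 1) * rs = 0 := by rw [← hz]; ring
      have e2 : n * rs = 0 := by rw [← hz]; ring
      constructor
      · rintro (h | h) <;> exact ⟨⟨by omega, by omega⟩, rfl⟩
      · rintro ⟨h, -⟩
        right
        exact ⟨by omega, by omega⟩
    · rw [if_neg (by omega : ¬ rs = 0)]
      have hle := PySem.Int.le_floordiv_iff_mul_le
        (a := (c.toNat : Int) - 97) (q := n - 1) hpos
      set q := PySem.Int.floordiv ((c.toNat : Int) - 97) rs with hqdef
      constructor
      · rintro (h | h)
        · have hnq : n - 1 ≤ q := hle.mpr (by omega)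
          exact ⟨⟨by omega, by omega⟩, by omega⟩
        · have hnq : n - 1 ≤ q := hle.mpr (by omega)
          exact ⟨⟨by omega, by omega⟩, by omega⟩
      · rintro ⟨h, hmin⟩
        have hnq : n - 1 ≤ q := by omega
        have := hle.mp hnq
        by_cases hcase : (c.toNat : Int) < 97 + n * rs
        · left; exact ⟨by omega, by omega⟩
        · right; exact ⟨by omega, by omega⟩

theorem pvIdxRange (n : Int) (hn : 0 < n) (c : Char) (hc : 'a' ≤ c ∧ c ≤ 'z') :
    0 ≤ pvIdx n (PySem.Int.floordiv 26 n) c ∧ pvIdx n (PySem.Int.floordiv 26 n) c < n := by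
  set rs := PySem.Int.floordiv 26 n with hrs
  have hrs0 : 0 ≤ rs := (PySem.Int.le_floordiv_iff_mul_le hn).mpr (by omega)
  have h97 : 97 ≤ c.toNat := hc.1
  unfold pvIdx
  rcases eq_or_lt_of_le hrs0 with hz | hpos
  · rw [if_pos hz.symm]; omega
  · rw [if_neg (by omega : ¬ rs = 0)]
    have hq0 : (0 : Int) ≤ PySem.Int.floordiv ((c.toNat : Int) - 97) rs :=
      (PySem.Int.le_floordiv_iff_mul_le hpos).mpr (by omega)
    omega

theorem pvFoldlIfNone {σ : Type} (u : σ → Int → σ) (p : Int → Prop) [DecidablePred p] :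
    ∀ (l : List Int) (s : σ), (∀ i ∈ l, ¬ p i) →
      l.foldl (fun r i => if p i then u r i else r) s = s := by
  intro l
  induction l with
  | nil => intro s _; rfl
  | cons a t ih =>
    intro s h
    simp only [List.foldl_cons]
    rw [if_neg (h a (List.mem_cons_self ..))]
    exact ih s (fun i hi => h i (List.mem_cons_of_mem a hi))

theorem pvFoldlIfUnique {σ : Type} (u : σ → Int → σ) (p : Int → Prop) [DecidablePred p] :
    ∀ (l : List Int) (s : σ) (j : Int), l.Nodup → j ∈ l → (∀ i ∈ l, p i ↔ i = j) →
      l.foldl (fun r i => if p i then u r i else r) s = u s j := by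
  intro l
  induction l with
  | nil => intro s j _ hj _; exact absurd hj (List.not_mem_nil)
  | cons a t ih =>
    intro s j hnd hj hp
    by_cases ha : a = j
    · subst ha
      simp only [List.foldl_cons]
      rw [if_pos ((hp a (List.mem_cons_self ..)).mpr rfl)]
      apply pvFoldlIfNone
      intro i hi hpi
      have hij := (hp i (List.mem_cons_of_mem a hi)).mp hpi
      subst hij
      exact (List.nodup_cons.mp hnd).1 hi
    · have hj' : j ∈ t := by
        rcases List.mem_cons.mp hj with h | h
        · exact absurd h.symm ha
        · exact h
      simp only [List.foldl_cons]
      rw [if_neg (fun hpa => ha ((hp a (List.mem_cons_self ..)).mp hpa))]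
      exact ih s j (List.nodup_cons.mp hnd).2 hj' (fun i hi => hp i (List.mem_cons_of_mem a hi))

theorem pvStepEq (n : Int) (hn : 0 < n) (c : Char) (mp : List String)
    (res : List (List (List String))) :
    (PySem.List.pyRange 0 n 1).foldl
      (fun res i =>
        if c ∈ PySem.List.pyGetD (pvAbc n (PySem.Int.floordiv 26 n) (PySem.Int.mod 26 n)) i [] then
          PySem.List.pySetD res i (PySem.List.pyGetD res i [] ++ [mp])
        else res) res
    = if 'a' ≤ c ∧ c ≤ 'z' then
        PySem.List.pySetD res (pvIdx n (PySem.Int.floordiv 26 n) c)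
          (PySem.List.pyGetD res (pvIdx n (PySem.Int.floordiv 26 n) c) [] ++ [mp])
      else res := by
  by_cases hc : 'a' ≤ c ∧ c ≤ 'z'
  · rw [if_pos hc]
    obtain ⟨hi0, hi1⟩ := pvIdxRange n hn c hc
    exact pvFoldlIfUnique
      (fun r i => PySem.List.pySetD r i (PySem.List.pyGetD r i [] ++ [mp]))
      (fun i => c ∈ PySem.List.pyGetD (pvAbc n (PySem.Int.floordiv 26 n) (PySem.Int.mod 26 n)) i [])
      (PySem.List.pyRange 0 n 1) res _ (PySem.List.nodup_pyRange_one 0 n)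
      (PySem.List.mem_pyRange_one.mpr ⟨hi0, hi1⟩)
      (fun i hi => by
        obtain ⟨hl, hr⟩ := PySem.List.mem_pyRange_one.mp hi
        show (c ∈ PySem.List.pyGetD (pvAbc n (PySem.Int.floordiv 26 n) (PySem.Int.mod 26 n)) i []) ↔
          i = pvIdx n (PySem.Int.floordiv 26 n) c
        rw [pvMemAbcIff n i hn hl hr c]
        exact ⟨fun h => h.2.symm, fun h => ⟨hc, h.symm⟩⟩)
  · rw [if_neg hc]
    exact pvFoldlIfNone
      (fun r i => PySem.List.pySetD r i (PySem.List.pyGetD r i [] ++ [mp]))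
      (fun i => c ∈ PySem.List.pyGetD (pvAbc n (PySem.Int.floordiv 26 n) (PySem.Int.mod 26 n)) i [])
      (PySem.List.pyRange 0 n 1) res
      (fun i hi hp => by
        obtain ⟨hl, hr⟩ := PySem.List.mem_pyRange_one.mp hi
        have hp' : c ∈ PySem.List.pyGetD (pvAbc n (PySem.Int.floordiv 26 n) (PySem.Int.mod 26 n)) i [] := hp
        exact hc ((pvMemAbcIff n i hn hl hr c).mp hp').1)

-- ===== VERDICT (by name: the statement is the Claim_ definition above) =====
theorem wcgroupmaps_py_spec : Claim_equal_wcgroupmaps_py := by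
  intro maps n _hDom hPre
  obtain ⟨hn, _hmp⟩ := hPre
  unfold Spec_wcgroupmaps_py
  simp only [wcgroupmaps_py, wcgroupmaps_py_alt]
  rw [pvBuildEq (PySem.Int.floordiv 26 n) n hn.le]
  simp only
  rw [pvAbcEq n (PySem.Int.floordiv 26 n) (PySem.Int.mod 26 n) hn]
  rw [show (PySem.List.pyRange 0 n 1).foldl
      (fun (r : List (List (List String))) _ => r ++ [[]]) [] =
      (PySem.List.pyRange 0 n 1).map (fun _ => []) from by
    simp]
  apply List.foldl_ext
  intro res mp _
  rw [pvStepEq n hn _ mp res]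
  simp only [pvIdx]
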